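-- pv_equiv track=rewrite | github.com/isi-metaphor/metaphor-adp-server | legacy/extractor-2014-06-no-span.py | create_d_struc
-- ===== SOURCE A (Python) =====
-- from collections import defaultdict
--
-- def create_d_struc(super_d, sub_d):
--     output = defaultdict(dict)
--
--     for superd in super_d:
--         for super_args in super_d[superd]:
--             if (
--                 superd not in output
--                 or super_args[0] not in output[superd]
--             ):
--                 output[superd][super_args[0]] = []
--
--             if sub_d:
--                 for subd in sub_d:
--                     for sub_args in sub_d[subd]:
--                         if len(sub_args) > 1 and super_args[0] == sub_args[1]:
--                             output[superd][super_args[0]].append(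
--                                 (subd, sub_args[0]))
--             else:
--                 output[superd][super_args[0]].append(("", super_args[0]))
--     return output
-- ===== SOURCE B (Python) =====
-- def create_d_struc(super_d, sub_d):
--     # One pass over sub_d builds an index keyed by sub_args[1]; each super arg
--     # is then resolved by a single hash lookup instead of a scan of sub_d.
--     index = {}
--     for subd, arglists in sub_d.items():
--         for sub_args in arglists:
--             if len(sub_args) > 1:
--                 index.setdefault(sub_args[1], []).append((subd, sub_args[0]))
--
--     def group(arglists):
--         inner = {}
--         for super_args in arglists:
--             a = super_args[0]
--             adds = index.get(a, []) if sub_d else [("", a)]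
--             inner[a] = inner.get(a, []) + adds
--         return inner
--
--     return {superd: group(arglists)
--             for superd, arglists in super_d.items() if arglists}
-- ===== Notes on version B (the rewrite author's own statement) =====
-- stated objective: faster
-- what changed: B builds a hash index of sub_d keyed by sub_args[1] in one pass and resolves each super argument by a single lookup, instead of A's rescan of all of sub_d for every super argument.
import Mathlib
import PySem

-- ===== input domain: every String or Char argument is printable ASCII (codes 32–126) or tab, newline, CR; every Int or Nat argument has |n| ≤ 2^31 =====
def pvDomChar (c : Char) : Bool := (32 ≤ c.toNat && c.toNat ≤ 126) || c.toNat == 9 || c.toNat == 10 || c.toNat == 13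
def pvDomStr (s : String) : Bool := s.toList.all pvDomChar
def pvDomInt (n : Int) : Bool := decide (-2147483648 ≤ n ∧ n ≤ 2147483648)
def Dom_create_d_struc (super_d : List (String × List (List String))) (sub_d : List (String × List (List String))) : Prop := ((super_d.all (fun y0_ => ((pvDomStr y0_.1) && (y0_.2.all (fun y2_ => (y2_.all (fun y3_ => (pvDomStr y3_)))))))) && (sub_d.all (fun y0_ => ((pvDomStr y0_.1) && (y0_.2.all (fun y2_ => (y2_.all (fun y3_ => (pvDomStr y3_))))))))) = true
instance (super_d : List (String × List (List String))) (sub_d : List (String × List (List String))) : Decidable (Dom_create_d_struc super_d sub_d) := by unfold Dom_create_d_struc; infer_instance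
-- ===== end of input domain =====

-- B re-implements the grouping with a one-pass hash index over sub_d instead of rescanning
-- sub_d for every super argument (asymptotic speed-up); return value only, A mutates nothing.

abbrev IDict := PySem.Dict String (List (String × String))
abbrev ODict := PySem.Dict String IDict

-- ===== PORT A =====
-- output[superd][a0].append(pr)  (both keys present at every call site)
def pvAppend (output : ODict) (superd a0 : String) (pr : String × String) : ODict :=
  output.modify superd PySem.Dict.empty (fun inner => inner.modify a0 [] (· ++ [pr]))

-- the two inner loops: for subd in sub_d: for sub_args in sub_d[subd]: …
-- (iterating subD.items is Python's key iteration + lookup: dict keys are unique)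
def pvSubMatch (subD : PySem.Dict String (List (List String))) (superd a0 : String)
    (output : ODict) : ODict :=
  subD.items.foldl (fun o q =>
    q.2.foldl (fun o sa =>
      if sa.length > 1 && (PySem.List.pyGet? sa 1 == some a0) then
        pvAppend o superd a0 (q.1, PySem.List.pyGetD sa 0 "")
      else o) o) output

-- one iteration of "for super_args in super_d[superd]"
def pvArgStepA (subD : PySem.Dict String (List (List String))) (superd : String)
    (output : ODict) (super_args : List String) : ODict :=
  match PySem.List.pyGet? super_args 0 with
  | none => output  -- super_args[0] raises IndexError in Python: excluded by Pre_
  | some a0 =>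
    let output1 :=
      if !(output.contains superd) || !((output.getD superd PySem.Dict.empty).contains a0) then
        output.insert superd ((output.getD superd PySem.Dict.empty).insert a0 [])
      else output
    if !subD.items.isEmpty then pvSubMatch subD superd a0 output1
    else pvAppend output1 superd a0 ("", a0)

def create_d_struc (super_d : List (String × List (List String))) (sub_d : List (String × List (List String))) : List (String × List (String × List (String × String))) :=
  let superD := PySem.Dict.ofList super_d
  let subD := PySem.Dict.ofList sub_d
  ((superD.items.foldl (fun o p => p.2.foldl (pvArgStepA subD p.1) o) PySem.Dict.empty).items.map
    (fun p => (p.1, p.2.items)))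

-- ===== PORT B =====
-- index[sub_args[1]].append((subd, sub_args[0])) for every sub arg pair, one pass
def pvIndex (subD : PySem.Dict String (List (List String))) : IDict :=
  subD.items.foldl (fun idx q =>
    q.2.foldl (fun idx sa =>
      if sa.length > 1 then
        idx.modify (PySem.List.pyGetD sa 1 "") [] (· ++ [(q.1, PySem.List.pyGetD sa 0 "")])
      else idx) idx) PySem.Dict.empty

-- inner = {}; inner[a] = inner.get(a, []) + adds
def pvGroup (subEmpty : Bool) (index : IDict) (arglists : List (List String)) : IDict :=
  arglists.foldl (fun inner sa =>
    match PySem.List.pyGet? sa 0 with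
    | none => inner  -- super_args[0] raises IndexError in Python: excluded by Pre_
    | some a =>
      let adds := if subEmpty then [("", a)] else index.getD a []
      inner.insert a (inner.getD a [] ++ adds)) PySem.Dict.empty

-- {superd: group(arglists) for …}: the keys of a dict are distinct, so the
-- comprehension builds its result by appending one fresh entry per key
def create_d_struc_alt (super_d : List (String × List (List String))) (sub_d : List (String × List (List String))) : List (String × List (String × List (String × String))) :=
  let subD := PySem.Dict.ofList sub_d
  let index := pvIndex subD
  (PySem.Dict.ofList super_d).items.foldl (fun out p =>
    if p.2.isEmpty then out
    else out ++ [(p.1, (pvGroup subD.items.isEmpty index p.2).items)]) []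

-- ===== PRECONDITION & SPEC =====
-- Pre_ excludes exactly the inputs where A raises IndexError: an empty argument
-- list among the values of the dict built from super_d (super_args[0] with super_args == []).
def Pre_create_d_struc (super_d : List (String × List (List String))) (sub_d : List (String × List (List String))) : Prop :=
  ∀ p ∈ (PySem.Dict.ofList super_d).items, ∀ sa ∈ p.2, sa ≠ []
instance (super_d : List (String × List (List String))) (sub_d : List (String × List (List String))) : Decidable (Pre_create_d_struc super_d sub_d) := by unfold Pre_create_d_struc; infer_instance

def pvWitness_create_d_struc : (List (String × List (List String))) × (List (String × List (List String))) :=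
  ([("a", [["x"], ["y"]]), ("b", [])], [("s", [["u", "x"], ["v"]])])

def Spec_create_d_struc (super_d : List (String × List (List String))) (sub_d : List (String × List (List String))) (out : List (String × List (String × List (String × String)))) : Prop := out = create_d_struc_alt super_d sub_d
instance (super_d : List (String × List (List String))) (sub_d : List (String × List (List String))) (out : List (String × List (String × List (String × String)))) : Decidable (Spec_create_d_struc super_d sub_d out) := by unfold Spec_create_d_struc; infer_instance

-- ===== CLAIM (what is proved, stated in full; the proofs are below) =====
def Claim_equal_create_d_struc : Prop := ∀ (super_d : List (String × List (List String))) (sub_d : List (String × List (List String))), Dom_create_d_struc super_d sub_d → Pre_create_d_struc super_d sub_d → Spec_create_d_struc super_d sub_d (create_d_struc super_d sub_d)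

-- ===== LEMMAS AND PROOFS =====

-- inserting back the value already stored at a present key changes nothing
theorem pv_insert_getD_self {κ ν : Type} [BEq κ] [LawfulBEq κ] (d : PySem.Dict κ ν) (k : κ)
    (d0 : ν) (hnd : d.keys.Nodup) (hc : d.contains k = true) : d.insert k (d.getD k d0) = d := by
  apply PySem.Dict.ext
  rw [PySem.Dict.items_insert_of_contains d _ hc]
  conv_rhs => rw [← List.map_id d.items]
  apply List.map_congr_left
  intro p hp
  by_cases h : (p.1 == k) = true
  · have hk : p.1 = k := by simpa using h
    subst hk
    have := PySem.Dict.getD_of_mem_items d (k := p.1) (v := p.2) (by simpa using hp) hnd d0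
    simp [this]
  · simp [h]

-- a fold whose every step only rewrites the value at key k localizes to that value
theorem pv_foldl_localize {κ ν β : Type} [BEq κ] [LawfulBEq κ] (k : κ) (d0 : ν)
    (G : PySem.Dict κ ν → β → PySem.Dict κ ν) (F : ν → β → ν) (l : List β)
    (hG : ∀ (o : PySem.Dict κ ν), o.contains k = true → o.keys.Nodup → ∀ x ∈ l,
      G o x = o.insert k (F (o.getD k d0) x))
    (o : PySem.Dict κ ν) (hc : o.contains k = true) (hnd : o.keys.Nodup) :
    l.foldl G o = o.insert k (l.foldl F (o.getD k d0)) := by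
  induction l generalizing o with
  | nil => simpa using (pv_insert_getD_self o k d0 hnd hc).symm
  | cons x xs ih =>
    simp only [List.foldl_cons]
    rw [hG o hc hnd x (by simp)]
    rw [ih (fun o hc hnd y hy => hG o hc hnd y (by simp [hy]))
        _ (PySem.Dict.contains_insert_self _ _ _) (PySem.Dict.nodup_keys_insert _ _ _ hnd)]
    rw [PySem.Dict.getD_insert_self, PySem.Dict.insert_insert_self]

-- the value-level residue of A's inner loops at one super argument
def pvInnerStepA (subD : PySem.Dict String (List (List String)))
    (inner : IDict) (sa : List String) : IDict :=
  match PySem.List.pyGet? sa 0 with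
  | none => inner
  | some a0 =>
    let inner1 := if !inner.contains a0 then inner.insert a0 [] else inner
    if !subD.items.isEmpty then
      subD.items.foldl (fun i q =>
        q.2.foldl (fun i sa' =>
          if sa'.length > 1 && (PySem.List.pyGet? sa' 1 == some a0) then
            i.modify a0 [] (· ++ [(q.1, PySem.List.pyGetD sa' 0 "")])
          else i) i) inner1
    else inner1.modify a0 [] (· ++ [("", a0)])

-- B's per-argument step (the lambda inside pvGroup)
def pvStepB (subEmpty : Bool) (index : IDict) (inner : IDict) (sa : List String) : IDict :=
  match PySem.List.pyGet? sa 0 with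
  | none => inner
  | some a =>
    let adds := if subEmpty then [("", a)] else index.getD a []
    inner.insert a (inner.getD a [] ++ adds)

theorem pvGroup_eq (e : Bool) (idx : IDict) (args : List (List String)) :
    pvGroup e idx args = args.foldl (pvStepB e idx) PySem.Dict.empty := rfl

-- A's per-argument step inserts, at key superd, the value-level step applied to the old value
theorem pv_argStepA_localize (subD : PySem.Dict String (List (List String))) (superd : String)
    (output : ODict) (hnd : output.keys.Nodup) (sa : List String) (hsa : sa ≠ []) :
    pvArgStepA subD superd output sa
      = output.insert superd (pvInnerStepA subD (output.getD superd PySem.Dict.empty) sa) := by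
  obtain ⟨a0, t, rfl⟩ := List.exists_cons_of_ne_nil hsa
  have hget : PySem.List.pyGet? (a0 :: t) 0 = some a0 := by
    simp
  simp only [pvArgStepA, pvInnerStepA, hget]
  have hout1 : (if !output.contains superd || !((output.getD superd PySem.Dict.empty).contains a0) then output.insert superd ((output.getD superd PySem.Dict.empty).insert a0 []) else output) = output.insert superd (if !((output.getD superd PySem.Dict.empty).contains a0) then (output.getD superd PySem.Dict.empty).insert a0 [] else (output.getD superd PySem.Dict.empty)) := by
    by_cases hca : (output.getD superd PySem.Dict.empty).contains a0 = true
    · have hcs : output.contains superd = true := by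
        by_contra hcs'
        rw [PySem.Dict.getD_of_not_contains _ _ (by simpa using hcs')] at hca
        simp [PySem.Dict.contains_empty] at hca
      simp only [hca, hcs, Bool.not_true, Bool.or_self, if_neg, Bool.false_eq_true,
        not_false_iff]
      exact (pv_insert_getD_self output superd _ hnd hcs).symm
    · have hca' : (output.getD superd PySem.Dict.empty).contains a0 = false :=
        Bool.eq_false_iff.mpr hca
      simp [hca']
  rw [hout1]
  set inner1 := (if !((output.getD superd PySem.Dict.empty).contains a0) then (output.getD superd PySem.Dict.empty).insert a0 [] else (output.getD superd PySem.Dict.empty)) with hinner1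
  by_cases hemp : subD.items.isEmpty
  · simp only [hemp, Bool.not_true, Bool.false_eq_true, if_false]
    simp [pvAppend, PySem.Dict.modify, PySem.Dict.getD_insert_self,
      PySem.Dict.insert_insert_self]
  · have hemp' : subD.items.isEmpty = false := Bool.eq_false_iff.mpr hemp
    simp only [hemp', Bool.not_false, if_true]
    show pvSubMatch subD superd a0 (output.insert superd inner1) = _
    unfold pvSubMatch
    rw [pv_foldl_localize superd PySem.Dict.empty _
      (fun i q => q.2.foldl (fun i sa' =>
        if sa'.length > 1 && (PySem.List.pyGet? sa' 1 == some a0) then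
          i.modify a0 [] (· ++ [(q.1, PySem.List.pyGetD sa' 0 "")])
        else i) i) subD.items
      (fun o hc hnd' q _ => by
        rw [pv_foldl_localize superd PySem.Dict.empty _
          (fun i sa' => if sa'.length > 1 && (PySem.List.pyGet? sa' 1 == some a0) then
            i.modify a0 [] (· ++ [(q.1, PySem.List.pyGetD sa' 0 "")]) else i) q.2
          (fun o' hc' hnd'' sa' _ => by
            by_cases hcond : (sa'.length > 1 && (PySem.List.pyGet? sa' 1 == some a0)) = true
            · simp [hcond, pvAppend, PySem.Dict.modify]
            · have hcond' := Bool.eq_false_iff.mpr hcond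
              simp only [hcond', Bool.false_eq_true, if_false]
              exact (pv_insert_getD_self o' superd _ hnd'' hc').symm)
          o hc hnd'])
      _ (PySem.Dict.contains_insert_self _ _ _) (PySem.Dict.nodup_keys_insert _ _ _ hnd)]
    rw [PySem.Dict.getD_insert_self, PySem.Dict.insert_insert_self]

-- the flat list of matches of a super argument a0 against all of sub_d
def pvMatches (subD : PySem.Dict String (List (List String))) (a0 : String) : List (String × String) :=
  subD.items.flatMap (fun q =>
    (q.2.filter (fun sa' => sa'.length > 1 && (PySem.List.pyGet? sa' 1 == some a0))).map
      (fun sa' => (q.1, PySem.List.pyGetD sa' 0 "")))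

-- a conditional keyed-append loop is the plain modify-append loop over its (key, value) pairs
theorem pv_modify_filterMap {κ : Type} [BEq κ] [LawfulBEq κ] {β γ : Type} (l : List γ)
    (c : γ → Prop) [DecidablePred c] (k : γ → κ) (v : γ → β) (d : PySem.Dict κ (List β)) :
    l.foldl (fun d x => if c x then d.modify (k x) [] (· ++ [v x]) else d) d
      = (l.filterMap (fun x => if c x then some (k x, v x) else none)).foldl
          (fun d p => d.modify p.1 [] (· ++ [p.2])) d := by
  induction l generalizing d with
  | nil => rfl
  | cons x xs ih =>
    by_cases hc : c x
    · simp [hc, ih]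
    · simp [hc, ih]

-- under the length guard, comparing the stored key equals A's comparison of sub_args[1]
theorem pv_key_eq (sa : List String) (a0 : String) (hlen : 1 < sa.length) :
    (PySem.List.pyGetD sa 1 "" == a0) = (PySem.List.pyGet? sa 1 == some a0) := by
  have h1 : PySem.List.pyGet? sa 1 = some sa[1] := by
    have := PySem.List.pyGet?_eq_some_getElem (xs := sa) (i := 1) (by omega)
      (by omega)
    simpa using this
  have h2 : PySem.List.pyGetD sa 1 "" = sa[1] := by
    have := PySem.List.pyGetD_eq_getElem (xs := sa) (i := 1) (d := "") (by omega)
      (by omega)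
    simpa using this
  simp [h1, h2]

theorem pv_matches_per_entry (a0 s : String) (l : List (List String)) :
    ((l.filterMap (fun sa => if sa.length > 1 then
        some (PySem.List.pyGetD sa 1 "", (s, PySem.List.pyGetD sa 0 "")) else none)).filter
      (fun p => p.1 == a0)).map (fun p => p.2)
    = (l.filter (fun sa => sa.length > 1 && (PySem.List.pyGet? sa 1 == some a0))).map
        (fun sa => (s, PySem.List.pyGetD sa 0 "")) := by
  induction l with
  | nil => rfl
  | cons sa l ih =>
    simp only [List.filterMap_cons, List.filter_cons]
    by_cases hlen : sa.length > 1
    · rw [if_pos hlen]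
      by_cases heq : (PySem.List.pyGet? sa 1 == some a0) = true
      · simp only [List.filter_cons, pv_key_eq sa a0 hlen, heq, if_pos, List.map_cons,
          decide_true, hlen, Bool.true_and, ih]
      · have heq' := Bool.eq_false_iff.mpr heq
        simp only [List.filter_cons, pv_key_eq sa a0 hlen, heq', decide_true, hlen,
          Bool.true_and, Bool.false_eq_true, if_false, ih]
    · have hlen' : ¬ (1 < sa.length) := hlen
      simp only [if_neg hlen, hlen', decide_false, Bool.false_and,
        Bool.false_eq_true, if_false, ih]

theorem pv_index_getD (subD : PySem.Dict String (List (List String))) (a0 : String) :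
    (pvIndex subD).getD a0 [] = pvMatches subD a0 := by
  unfold pvIndex pvMatches
  simp only [pv_modify_filterMap]
  rw [← List.foldl_flatMap]
  rw [PySem.Dict.getD_foldl_modify_append]
  simp only [PySem.Dict.getD_empty, List.nil_append, List.filter_flatMap, List.map_flatMap]
  exact List.flatMap_congr (fun q _ => pv_matches_per_entry a0 q.1 q.2)

theorem pv_innerStepA_eq (subD : PySem.Dict String (List (List String)))
    (inner : IDict) (hnd : inner.keys.Nodup) (sa : List String) :
    pvInnerStepA subD inner sa = pvStepB subD.items.isEmpty (pvIndex subD) inner sa := by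
  cases hga : PySem.List.pyGet? sa 0 with
  | none => simp [pvInnerStepA, pvStepB, hga]
  | some a0 =>
    simp only [pvInnerStepA, pvStepB, hga]
    set inner1 := (if !inner.contains a0 then inner.insert a0 [] else inner) with hinner1
    have hgd : inner1.getD a0 [] = inner.getD a0 [] := by
      by_cases hca : inner.contains a0 = true
      · simp [hinner1, hca]
      · have hca' := Bool.eq_false_iff.mpr hca
        simp [hinner1, hca', PySem.Dict.getD_insert_self,
          PySem.Dict.getD_of_not_contains _ _ hca']
    have hins : ∀ v, inner1.insert a0 v = inner.insert a0 v := by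
      intro v
      by_cases hca : inner.contains a0 = true
      · simp [hinner1, hca]
      · simp [hinner1, Bool.eq_false_iff.mpr hca, PySem.Dict.insert_insert_self]
    have hc1 : inner1.contains a0 = true := by
      by_cases hca : inner.contains a0 = true
      · simp [hinner1, hca]
      · simp [hinner1, Bool.eq_false_iff.mpr hca, PySem.Dict.contains_insert_self]
    have hnd1 : inner1.keys.Nodup := by
      by_cases hca : inner.contains a0 = true
      · simp [hinner1, hca, hnd]
      · simp only [hinner1, Bool.eq_false_iff.mpr hca, Bool.not_false, if_true]
        exact PySem.Dict.nodup_keys_insert _ _ _ hnd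
    by_cases hemp : subD.items.isEmpty
    · simp only [hemp, Bool.not_true, Bool.false_eq_true, if_false, if_true]
      simp [PySem.Dict.modify, hgd, hins]
    · have hemp' := Bool.eq_false_iff.mpr hemp
      simp only [hemp', Bool.not_false, if_true, Bool.false_eq_true, if_false]
      rw [pv_foldl_localize a0 ([] : List (String × String)) _
        (fun L q => q.2.foldl (fun L sa' =>
          if sa'.length > 1 && (PySem.List.pyGet? sa' 1 == some a0) then
            L ++ [(q.1, PySem.List.pyGetD sa' 0 "")] else L) L) subD.items
        (fun i hci hndi q _ => by
          rw [pv_foldl_localize a0 ([] : List (String × String)) _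
            (fun L sa' => if sa'.length > 1 && (PySem.List.pyGet? sa' 1 == some a0) then
              L ++ [(q.1, PySem.List.pyGetD sa' 0 "")] else L) q.2
            (fun i' hci' hndi' sa' _ => by
              by_cases hcond : (sa'.length > 1 && (PySem.List.pyGet? sa' 1 == some a0)) = true
              · simp [hcond, PySem.Dict.modify]
              · simp only [Bool.eq_false_iff.mpr hcond, Bool.false_eq_true, if_false]
                exact (pv_insert_getD_self i' a0 _ hndi' hci').symm)
            i hci hndi])
        inner1 hc1 hnd1]
      rw [hgd, hins]
      congr 1
      simp only [PySem.List.foldl_append_if]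
      rw [PySem.List.foldl_append_eq_flatMap]
      rw [pv_index_getD]
      rfl

theorem pv_group_fold_eq (subD : PySem.Dict String (List (List String)))
    (args : List (List String)) (inner : IDict) (hnd : inner.keys.Nodup) :
    args.foldl (pvInnerStepA subD) inner
      = args.foldl (pvStepB subD.items.isEmpty (pvIndex subD)) inner := by
  induction args generalizing inner with
  | nil => rfl
  | cons sa args ih =>
    rw [List.foldl_cons, List.foldl_cons, pv_innerStepA_eq subD inner hnd sa]
    apply ih
    cases hga : PySem.List.pyGet? sa 0 with
    | none => simpa [pvStepB, hga] using hnd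
    | some a =>
      simp only [pvStepB, hga]
      exact PySem.Dict.nodup_keys_insert _ _ _ hnd

-- B's conditional-append loop shifts its accumulator
theorem pv_foldB_acc (subD : PySem.Dict String (List (List String)))
    (items : List (String × List (List String))) (acc : List (String × List (String × List (String × String)))) :
    items.foldl (fun out p =>
        if p.2.isEmpty then out
        else out ++ [(p.1, (pvGroup subD.items.isEmpty (pvIndex subD) p.2).items)]) acc
      = acc ++ items.foldl (fun out p =>
          if p.2.isEmpty then out
          else out ++ [(p.1, (pvGroup subD.items.isEmpty (pvIndex subD) p.2).items)]) [] := by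
  induction items generalizing acc with
  | nil => simp
  | cons p rest ih =>
    by_cases hpe : p.2.isEmpty
    · simp only [List.foldl_cons, hpe, if_pos]
      exact ih acc
    · have hpe' := Bool.eq_false_iff.mpr hpe
      simp only [List.foldl_cons, hpe', Bool.false_eq_true, if_false]
      rw [ih (acc ++ _), ih ([] ++ _)]
      simp

-- main induction over the entries of super_d's dict
theorem pv_main (subD : PySem.Dict String (List (List String)))
    (items : List (String × List (List String))) (o : ODict)
    (hnd : o.keys.Nodup) (hfresh : ∀ p ∈ items, o.contains p.1 = false)
    (hkeys : (items.map Prod.fst).Nodup)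
    (hpre : ∀ p ∈ items, ∀ sa ∈ p.2, sa ≠ []) :
    (items.foldl (fun o p => p.2.foldl (pvArgStepA subD p.1) o) o).items.map
        (fun p => (p.1, p.2.items))
      = o.items.map (fun p => (p.1, p.2.items))
        ++ items.foldl (fun out p =>
            if p.2.isEmpty then out
            else out ++ [(p.1, (pvGroup subD.items.isEmpty (pvIndex subD) p.2).items)]) [] := by
  induction items generalizing o with
  | nil => simp
  | cons p rest ih =>
    have hfp : o.contains p.1 = false := hfresh p (List.mem_cons_self)
    simp only [List.foldl_cons]
    rcases hargs : p.2 with _ | ⟨sa, args⟩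
    · simp only [hargs, List.foldl_nil, List.isEmpty_nil, if_pos]
      exact ih o hnd (fun q hq => hfresh q (List.mem_cons_of_mem _ hq))
        (by simpa using hkeys.of_cons) (fun q hq => hpre q (List.mem_cons_of_mem _ hq))
    · -- localize the whole argument loop of entry p to key p.1
      have hpre_p := hpre p List.mem_cons_self
      rw [hargs] at hpre_p
      have hloop : (sa :: args).foldl (pvArgStepA subD p.1) o
          = o.insert p.1 ((sa :: args).foldl (pvInnerStepA subD) (o.getD p.1 PySem.Dict.empty)) := by
        rw [List.foldl_cons,
          pv_argStepA_localize subD p.1 o hnd sa (hpre_p sa (by simp)),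
          pv_foldl_localize p.1 PySem.Dict.empty _ (pvInnerStepA subD) args
            (fun o' hc' hnd' x hx =>
              pv_argStepA_localize subD p.1 o' hnd' x
                (hpre_p x (List.mem_cons_of_mem _ hx)))
            _ (PySem.Dict.contains_insert_self _ _ _) (PySem.Dict.nodup_keys_insert _ _ _ hnd),
          PySem.Dict.getD_insert_self, PySem.Dict.insert_insert_self, List.foldl_cons]
      rw [hloop]
      have hG : (sa :: args).foldl (pvInnerStepA subD) (o.getD p.1 PySem.Dict.empty)
          = pvGroup subD.items.isEmpty (pvIndex subD) (sa :: args) := by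
        rw [PySem.Dict.getD_of_not_contains _ _ hfp,
          pv_group_fold_eq subD (sa :: args) PySem.Dict.empty PySem.Dict.nodup_keys_empty,
          pvGroup_eq]
      rw [hG]
      have hfresh' : ∀ q ∈ rest, (o.insert p.1 (pvGroup subD.items.isEmpty (pvIndex subD) (sa :: args))).contains q.1 = false := by
        intro q hq
        rw [PySem.Dict.contains_insert]
        have hne : q.1 ≠ p.1 := by
          intro h
          have : p.1 ∈ rest.map Prod.fst := h ▸ List.mem_map_of_mem hq
          exact (List.nodup_cons.mp hkeys).1 this
        simp [hne, hfresh q (List.mem_cons_of_mem _ hq)]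
      rw [ih _ (PySem.Dict.nodup_keys_insert _ _ _ hnd) hfresh'
        (by simpa using hkeys.of_cons) (fun q hq => hpre q (List.mem_cons_of_mem _ hq))]
      rw [PySem.Dict.items_insert_of_not_contains _ _ hfp]
      simp only [List.isEmpty_cons, Bool.false_eq_true, if_false, List.nil_append]
      rw [pv_foldB_acc subD rest [(p.1, (pvGroup subD.items.isEmpty (pvIndex subD) (sa :: args)).items)]]
      simp

-- ===== VERDICT (by name: the statement is the Claim_ definition above) =====
theorem create_d_struc_spec : Claim_equal_create_d_struc := by
  unfold Claim_equal_create_d_struc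
  intro super_d sub_d _ hpre
  unfold Spec_create_d_struc
  show create_d_struc super_d sub_d = create_d_struc_alt super_d sub_d
  unfold create_d_struc create_d_struc_alt
  rw [pv_main (PySem.Dict.ofList sub_d) (PySem.Dict.ofList super_d).items PySem.Dict.empty
    PySem.Dict.nodup_keys_empty (fun p _ => PySem.Dict.contains_empty p.1)
    (PySem.Dict.nodup_keys_ofList super_d) hpre]
  rfl
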